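-- pv_equiv track=rewrite | github.com/OpenCPLC/Wizard | utils.py | LineReplace
-- ===== SOURCE A (Python) =====
-- def LineReplace(text:str, phrase:str, new_content:str, limit:int=1) -> str:
--   lines = text.splitlines()
--   result = []
--   count = 0
--   for line in lines:
--     if phrase in line and count < limit:
--       indent = len(line) - len(line.lstrip())
--       new_line = " " * indent + new_content
--       result.append(new_line)
--       count += 1
--     else:
--       result.append(line)
--   return "\n".join(result)
-- ===== SOURCE B (Python) =====
-- def LineReplace(text: str, phrase: str, new_content: str, limit: int = 1) -> str:
--     lines = text.splitlines()
--     cap = max(limit, 0)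
--     targets = set()
--     for i, line in enumerate(lines):
--         if len(targets) >= cap:
--             break
--         if phrase in line:
--             targets.add(i)
--     return "\n".join(
--         " " * (len(line) - len(line.lstrip())) + new_content if i in targets else line
--         for i, line in enumerate(lines)
--     )
-- ===== Notes on version B (the rewrite author's own statement) =====
-- stated objective: alternative
-- what changed: Replaces the single pass with an inline running counter by two passes: first collect the indices of the first max(limit,0) matching lines into a set (with early break), then rebuild the text by mapping over enumerate(lines), replacing exactly the lines whose index is in that set.
import Mathlib
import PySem

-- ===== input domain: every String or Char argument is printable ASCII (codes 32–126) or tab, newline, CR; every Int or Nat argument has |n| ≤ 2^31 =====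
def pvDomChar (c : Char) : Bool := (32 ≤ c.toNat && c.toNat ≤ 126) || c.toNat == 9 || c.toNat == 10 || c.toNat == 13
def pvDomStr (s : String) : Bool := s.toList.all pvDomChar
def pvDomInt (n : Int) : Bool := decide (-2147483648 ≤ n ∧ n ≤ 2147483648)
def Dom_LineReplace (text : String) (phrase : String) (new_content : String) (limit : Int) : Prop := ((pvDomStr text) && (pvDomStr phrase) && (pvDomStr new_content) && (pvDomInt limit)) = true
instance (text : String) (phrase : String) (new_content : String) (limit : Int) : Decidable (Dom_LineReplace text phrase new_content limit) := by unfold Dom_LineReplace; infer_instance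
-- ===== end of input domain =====

-- B is an alternative decomposition: a first pass collects the indices of the first
-- max(limit,0) matching lines into a set, a second pass rebuilds the text from those
-- indices; A decides inline with a running counter. Equal return value on all inputs.

-- ' ' * indent + new_content, where indent = len(line) - len(line.lstrip());
-- shared by both ports (both Pythons compute this same expression).
def pvNewLine (new_content : List Char) (line : List Char) : List Char :=
  PySem.List.pyRepeat [' '] (PySem.Chars.len line - PySem.Chars.len (PySem.Chars.lstrip line)) ++ new_content

-- ===== PORT A =====
def LineReplace (text : String) (phrase : String) (new_content : String) (limit : Int) : String :=
  let lines := PySem.Chars.splitlines text.toList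
  let st := lines.foldl (fun (st : List (List Char) × Int) line =>
      if PySem.Chars.isIn phrase.toList line && decide (st.2 < limit) then
        (st.1 ++ [pvNewLine new_content.toList line], st.2 + 1)
      else
        (st.1 ++ [line], st.2)) ([], 0)
  String.mk (PySem.Chars.join ['\n'] st.1)

-- ===== PORT B =====
-- first pass: indices of matching lines, stopping once the set has cap elements
def pvCollect (phrase : List Char) (cap : Int) :
    List (Int × List Char) → PySem.Set Int → PySem.Set Int
  | [], targets => targets
  | (i, line) :: rest, targets =>
      if cap ≤ PySem.Set.len targets then targets
      else if PySem.Chars.isIn phrase line then pvCollect phrase cap rest (targets.add i)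
      else pvCollect phrase cap rest targets

def LineReplace_alt (text : String) (phrase : String) (new_content : String) (limit : Int) : String :=
  let lines := PySem.Chars.splitlines text.toList
  let cap := max limit 0
  let targets := pvCollect phrase.toList cap (PySem.List.enumerate lines) PySem.Set.empty
  String.mk (PySem.Chars.join ['\n'] ((PySem.List.enumerate lines).map (fun p =>
      if targets.contains p.1 then pvNewLine new_content.toList p.2 else p.2)))

-- ===== PRECONDITION & SPEC =====
def Spec_LineReplace (text : String) (phrase : String) (new_content : String) (limit : Int) (out : String) : Prop := out = LineReplace_alt text phrase new_content limit
instance (text : String) (phrase : String) (new_content : String) (limit : Int) (out : String) : Decidable (Spec_LineReplace text phrase new_content limit out) := by unfold Spec_LineReplace; infer_instance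

-- ===== CLAIM (what is proved, stated in full; the proofs are below) =====
def Claim_equal_LineReplace : Prop := ∀ (text : String) (phrase : String) (new_content : String) (limit : Int), Dom_LineReplace text phrase new_content limit → Spec_LineReplace text phrase new_content limit (LineReplace text phrase new_content limit)

-- ===== LEMMAS AND PROOFS =====

-- common reference function: replace matching lines while the counter is below limit
def goLR (ph new : List Char) (limit : Int) : Int → List (List Char) → List (List Char)
  | _, [] => []
  | c, l :: ls =>
      if PySem.Chars.isIn ph l && decide (c < limit) then
        pvNewLine new l :: goLR ph new limit (c + 1) ls
      else
        l :: goLR ph new limit c ls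

-- A's fold equals goLR
theorem foldA_eq_go (ph new : List Char) (limit : Int) :
    ∀ (ls : List (List Char)) (acc : List (List Char)) (c : Int),
      (ls.foldl (fun (st : List (List Char) × Int) line =>
        if PySem.Chars.isIn ph line && decide (st.2 < limit) then
          (st.1 ++ [pvNewLine new line], st.2 + 1)
        else
          (st.1 ++ [line], st.2)) (acc, c)).1 = acc ++ goLR ph new limit c ls := by
  intro ls
  induction ls with
  | nil => intro acc c; simp [goLR]
  | cons l ls ih =>
      intro acc c
      rw [List.foldl_cons]
      simp only [goLR]
      by_cases h : (PySem.Chars.isIn ph l && decide (c < limit)) = true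
      · rw [if_pos h, if_pos h, ih]; simp
      · rw [if_neg h, if_neg h, ih]; simp

-- pvCollect is the identity once the cap is reached
theorem pvCollect_of_cap_le (ph : List Char) (cap : Int)
    (l : List (Int × List Char)) (s : PySem.Set Int) (h : cap ≤ PySem.Set.len s) :
    pvCollect ph cap l s = s := by
  cases l with
  | nil => rfl
  | cons p rest =>
      cases p with
      | mk i line => simp only [pvCollect]; rw [if_pos h]

-- pvCollect only ever adds indices occurring in its list
theorem mem_pvCollect (ph : List Char) (cap : Int) :
    ∀ (l : List (Int × List Char)) (s : PySem.Set Int) (x : Int),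
      x ∈ pvCollect ph cap l s → x ∈ s ∨ ∃ p ∈ l, x = p.1 := by
  intro l
  induction l with
  | nil => intro s x hx; exact Or.inl hx
  | cons p rest ih =>
      intro s x hx
      cases p with
      | mk i line =>
          simp only [pvCollect] at hx
          by_cases hc : cap ≤ PySem.Set.len s
          · rw [if_pos hc] at hx; exact Or.inl hx
          · rw [if_neg hc] at hx
            by_cases hm : PySem.Chars.isIn ph line = true
            · rw [if_pos hm] at hx
              rcases ih _ _ hx with h | ⟨q, hq, hxq⟩
              · rcases (PySem.Set.mem_add s i x).1 h with h | h
                · exact Or.inl h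
                · exact Or.inr ⟨(i, line), by simp, h⟩
              · exact Or.inr ⟨q, by simp [hq], hxq⟩
            · rw [if_neg hm] at hx
              rcases ih _ _ hx with h | ⟨q, hq, hxq⟩
              · exact Or.inl h
              · exact Or.inr ⟨q, by simp [hq], hxq⟩

-- pvCollect never removes an element
theorem mem_pvCollect_of_mem (ph : List Char) (cap : Int) :
    ∀ (l : List (Int × List Char)) (s : PySem.Set Int) (x : Int),
      x ∈ s → x ∈ pvCollect ph cap l s := by
  intro l
  induction l with
  | nil => intro s x hx; exact hx
  | cons p rest ih =>
      intro s x hx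
      cases p with
      | mk i line =>
          simp only [pvCollect]
          by_cases hc : cap ≤ PySem.Set.len s
          · rw [if_pos hc]; exact hx
          · rw [if_neg hc]
            by_cases hm : PySem.Chars.isIn ph line = true
            · rw [if_pos hm]
              exact ih _ _ ((PySem.Set.mem_add s i x).2 (Or.inl hx))
            · rw [if_neg hm]
              exact ih _ _ hx

theorem set_len_nonneg (s : PySem.Set Int) : 0 ≤ PySem.Set.len s := by
  simp [PySem.Set.len]

theorem set_len_add_of_not_mem (s : PySem.Set Int) (x : Int) (h : x ∉ s) :
    PySem.Set.len (s.add x) = PySem.Set.len s + 1 := by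
  simp [PySem.Set.add, PySem.Set.len, List.contains_eq_mem, h]

-- main bridge: B's map over enumerate with the collected index set equals goLR
theorem mapB_eq_go (ph new : List Char) (limit : Int) :
    ∀ (ls : List (List Char)) (s : Int) (s0 : PySem.Set Int),
      (∀ i ∈ s0, i < s) →
      (PySem.List.enumerate ls s).map (fun p =>
        if (pvCollect ph (max limit 0) (PySem.List.enumerate ls s) s0).contains p.1 then
          pvNewLine new p.2 else p.2)
        = goLR ph new limit (PySem.Set.len s0) ls := by
  intro ls
  induction ls with
  | nil => intro s s0 _; simp [PySem.List.enumerate_nil, goLR]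
  | cons l ls ih =>
      intro s s0 hlt
      have hs0s : s ∉ s0 := fun h => lt_irrefl s (hlt s h)
      rw [PySem.List.enumerate_cons]
      by_cases hc : max limit 0 ≤ PySem.Set.len s0
      · -- counter at cap: nothing is replaced any more
        have hnl : ¬ PySem.Set.len s0 < limit := by
          have := le_max_left limit 0
          omega
        rw [pvCollect_of_cap_le _ _ _ _ hc]
        have hd : PySem.Set.contains s0 s = false := by
          simp [List.contains_eq_mem, hs0s, PySem.Set.contains]
        have htail : (PySem.List.enumerate ls (s + 1)).map (fun p =>
            if PySem.Set.contains s0 p.1 then pvNewLine new p.2 else p.2)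
            = goLR ph new limit (PySem.Set.len s0) ls := by
          have := ih (s + 1) s0 (fun i hi => lt_trans (hlt i hi) (by omega))
          rwa [pvCollect_of_cap_le _ _ _ _ hc] at this
        simp [PySem.Set.len] at hnl htail
        simp [goLR, hnl, hs0s, htail]
      · have hcl : PySem.Set.len s0 < limit := by
          have := set_len_nonneg s0
          omega
        simp only [pvCollect, if_neg hc]
        by_cases hm : PySem.Chars.isIn ph l = true
        · -- matching line: index s goes into the set, counter goes up
          rw [if_pos hm]
          have hmem : s ∈ pvCollect ph (max limit 0) (PySem.List.enumerate ls (s + 1)) (s0.add s) :=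
            mem_pvCollect_of_mem _ _ _ _ _ ((PySem.Set.mem_add s0 s s).2 (Or.inr rfl))
          have hhead := (PySem.Set.contains_iff _ s).2 hmem
          have htail := ih (s + 1) (s0.add s) (by
            intro i hi
            rcases (PySem.Set.mem_add s0 s i).1 hi with hi | hi
            · exact lt_trans (hlt i hi) (by omega)
            · omega)
          rw [set_len_add_of_not_mem _ _ hs0s] at htail
          simp [PySem.Set.len] at hcl htail
          simp at hhead htail
          simp [goLR, hm, hcl, hhead, htail]
        · -- non-matching line: index s is in neither the set nor the rest
          rw [if_neg hm]
          have hnot : s ∉ pvCollect ph (max limit 0) (PySem.List.enumerate ls (s + 1)) s0 := by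
            intro h
            rcases mem_pvCollect _ _ _ _ _ h with h | ⟨p, hp, hsp⟩
            · exact hs0s h
            · rcases (PySem.List.mem_enumerate_iff _ _ _).1 hp with ⟨k, hk, rfl⟩
              simp at hsp
              omega
          have hhead : PySem.Set.contains
              (pvCollect ph (max limit 0) (PySem.List.enumerate ls (s + 1)) s0) s = false := by
            by_contra h
            exact hnot ((PySem.Set.contains_iff _ s).1 (by revert h; cases PySem.Set.contains (pvCollect ph (max limit 0) (PySem.List.enumerate ls (s + 1)) s0) s <;> simp))
          have htail := ih (s + 1) s0 (fun i hi => lt_trans (hlt i hi) (by omega))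
          simp [PySem.Set.len] at htail
          simp [goLR, hm, hnot, htail]

-- ===== VERDICT (by name: the statement is the Claim_ definition above) =====
theorem LineReplace_spec : Claim_equal_LineReplace := by
  intro text phrase new_content limit _
  show LineReplace text phrase new_content limit = LineReplace_alt text phrase new_content limit
  rw [LineReplace, LineReplace_alt]
  have hvac : ∀ i ∈ (PySem.Set.empty : PySem.Set Int), i < (0 : Int) := by
    intro i hi; simp [PySem.Set.empty] at hi
  have hlen : PySem.Set.len (PySem.Set.empty : PySem.Set Int) = 0 := by
    simp [PySem.Set.len, PySem.Set.empty]
  simp only [foldA_eq_go phrase.toList new_content.toList limit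
      (PySem.Chars.splitlines text.toList) [] 0,
    mapB_eq_go phrase.toList new_content.toList limit
      (PySem.Chars.splitlines text.toList) 0 PySem.Set.empty hvac, hlen, List.nil_append]
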